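-- pv_equiv track=rewrite | github.com/ryan-rushton/mtg-mcp-server | tools/commander_analysis.py | _categorize_cards_automatically
-- ===== SOURCE A (Python) =====
-- from typing import List, Set, Dict, Any
--
-- def _categorize_cards_automatically(
--     found_cards: List[Dict[str, Any]],
-- ) -> Dict[str, List[str]]:
--     """Automatically categorize cards into Command Zone framework based on their properties."""
--     categories: Dict[str, List[str]] = {
--         "ramp": [],
--         "card_advantage": [],
--         "targeted_disruption": [],
--         "mass_disruption": [],
--         "lands": [],
--         "plan_cards": [],
--     }
--
--     for card_data in found_cards:
--         name = card_data.get("name", "")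
--         type_line = card_data.get("type_line", "").lower()
--         oracle_text = card_data.get("oracle_text", "").lower()
--
--         # Lands category
--         if "land" in type_line:
--             categories["lands"].append(name)
--             continue
--
--         # Ramp category - mana acceleration
--         if any(
--             keyword in oracle_text
--             for keyword in [
--                 "add",
--                 "mana",
--                 "search",
--                 "basic land",
--                 "rampant growth",
--                 "cultivate",
--                 "sol ring",
--                 "signet",
--                 "talisman",
--                 "arcane signet",
--                 "chromatic lantern",
--             ]
--         ) and not any(
--             keyword in oracle_text for keyword in ["draw", "destroy", "counter"]
--         ):
--             categories["ramp"].append(name)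
--
--         # Card advantage - draw and advantage
--         elif any(
--             keyword in oracle_text
--             for keyword in [
--                 "draw",
--                 "card",
--                 "hand",
--                 "library",
--                 "exile.*play",
--                 "impulse",
--                 "scry 2 or more",
--             ]
--         ) and not any(keyword in oracle_text for keyword in ["discard", "destroy"]):
--             categories["card_advantage"].append(name)
--
--         # Targeted disruption - single target removal/interaction
--         elif any(
--             keyword in oracle_text
--             for keyword in [
--                 "destroy target",
--                 "exile target",
--                 "counter target",
--                 "return target",
--                 "bounce",
--                 "remove",
--                 "path to exile",
--                 "swords to plowshares",
--             ]
--         ):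
--             categories["targeted_disruption"].append(name)
--
--         # Mass disruption - board wipes and mass effects
--         elif any(
--             keyword in oracle_text
--             for keyword in [
--                 "destroy all",
--                 "exile all",
--                 "return all",
--                 "wrath",
--                 "board wipe",
--                 "each player",
--                 "each opponent",
--                 "all creatures",
--                 "all artifacts",
--             ]
--         ):
--             categories["mass_disruption"].append(name)
--
--         # Everything else goes to plan cards (win conditions, synergy, etc.)
--         else:
--             categories["plan_cards"].append(name)
--
--     return categories
-- ===== SOURCE B (Python) =====
-- from typing import List, Dict, Any
--
-- # Ordered rule table: (category, field to scan, positive keywords, exclusion keywords).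
-- _RULES = [
--     ("lands", "type_line", ["land"], []),
--     ("ramp", "oracle_text",
--      ["add", "mana", "search", "basic land", "rampant growth", "cultivate",
--       "sol ring", "signet", "talisman", "arcane signet", "chromatic lantern"],
--      ["draw", "destroy", "counter"]),
--     ("card_advantage", "oracle_text",
--      ["draw", "card", "hand", "library", "exile.*play", "impulse", "scry 2 or more"],
--      ["discard", "destroy"]),
--     ("targeted_disruption", "oracle_text",
--      ["destroy target", "exile target", "counter target", "return target",
--       "bounce", "remove", "path to exile", "swords to plowshares"], []),
--     ("mass_disruption", "oracle_text",
--      ["destroy all", "exile all", "return all", "wrath", "board wipe",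
--       "each player", "each opponent", "all creatures", "all artifacts"], []),
-- ]
--
-- _CATEGORY_ORDER = ["ramp", "card_advantage", "targeted_disruption",
--                    "mass_disruption", "lands", "plan_cards"]
--
--
-- def _classify(card_data):
--     type_line = card_data.get("type_line", "").lower()
--     oracle_text = card_data.get("oracle_text", "").lower()
--     for cat, field, pos, neg in _RULES:
--         text = type_line if field == "type_line" else oracle_text
--         if any(k in text for k in pos) and not any(k in text for k in neg):
--             return cat
--     return "plan_cards"
--
--
-- def _categorize_cards_automatically(found_cards):
--     return {
--         cat: [c.get("name", "") for c in found_cards if _classify(c) == cat]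
--         for cat in _CATEGORY_ORDER
--     }
-- ===== Notes on version B (the rewrite author's own statement) =====
-- stated objective: simpler
-- what changed: A's single loop over cards with an if/elif chain appending into a pre-built dict is replaced by a declarative ordered rule table (category, field, positive keywords, exclusion keywords) with a first-matching-rule classifier, and the result dict is built by one comprehension per category.
import Mathlib
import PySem

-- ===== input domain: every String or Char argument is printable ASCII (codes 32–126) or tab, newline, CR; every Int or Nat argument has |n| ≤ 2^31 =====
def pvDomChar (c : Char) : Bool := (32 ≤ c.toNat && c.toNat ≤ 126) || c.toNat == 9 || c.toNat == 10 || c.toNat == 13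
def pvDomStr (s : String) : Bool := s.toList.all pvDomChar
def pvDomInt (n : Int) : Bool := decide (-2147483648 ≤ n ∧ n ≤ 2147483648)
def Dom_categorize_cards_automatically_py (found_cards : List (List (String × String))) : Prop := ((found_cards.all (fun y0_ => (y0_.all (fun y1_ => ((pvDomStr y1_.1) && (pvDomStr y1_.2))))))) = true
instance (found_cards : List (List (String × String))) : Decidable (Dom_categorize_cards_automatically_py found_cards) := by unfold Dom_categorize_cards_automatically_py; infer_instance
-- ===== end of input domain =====

-- B replaces A's single dict-appending loop with an ordered rule table (first matching
-- rule classifies a card) and builds each category by one comprehension; objective: simpler.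

-- ===== PORT A =====
def pvStepA (cats : PySem.Dict String (List String)) (card_data : List (String × String)) : PySem.Dict String (List String) :=
  let name := (PySem.Dict.mk card_data).getD "name" ""
  let type_line := PySem.Str.lower ((PySem.Dict.mk card_data).getD "type_line" "")
  let oracle_text := PySem.Str.lower ((PySem.Dict.mk card_data).getD "oracle_text" "")
  if PySem.Str.isIn "land" type_line then
    cats.modify "lands" [] (fun l => l ++ [name])
  else if (["add", "mana", "search", "basic land", "rampant growth", "cultivate",
            "sol ring", "signet", "talisman", "arcane signet", "chromatic lantern"].any
             (fun k => PySem.Str.isIn k oracle_text))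
          && !(["draw", "destroy", "counter"].any (fun k => PySem.Str.isIn k oracle_text)) then
    cats.modify "ramp" [] (fun l => l ++ [name])
  else if (["draw", "card", "hand", "library", "exile.*play", "impulse", "scry 2 or more"].any
             (fun k => PySem.Str.isIn k oracle_text))
          && !(["discard", "destroy"].any (fun k => PySem.Str.isIn k oracle_text)) then
    cats.modify "card_advantage" [] (fun l => l ++ [name])
  else if ["destroy target", "exile target", "counter target", "return target",
           "bounce", "remove", "path to exile", "swords to plowshares"].any
            (fun k => PySem.Str.isIn k oracle_text) then
    cats.modify "targeted_disruption" [] (fun l => l ++ [name])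
  else if ["destroy all", "exile all", "return all", "wrath", "board wipe",
           "each player", "each opponent", "all creatures", "all artifacts"].any
            (fun k => PySem.Str.isIn k oracle_text) then
    cats.modify "mass_disruption" [] (fun l => l ++ [name])
  else
    cats.modify "plan_cards" [] (fun l => l ++ [name])

def categorize_cards_automatically_py (found_cards : List (List (String × String))) : List (String × List String) :=
  (found_cards.foldl pvStepA
    (PySem.Dict.ofList [("ramp", []), ("card_advantage", []), ("targeted_disruption", []),
                        ("mass_disruption", []), ("lands", []), ("plan_cards", [])])).items

-- ===== PORT B =====
-- Ordered rule table: (category, field to scan, positive keywords, exclusion keywords).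
def pvRules : List (String × String × List String × List String) :=
  [("lands", "type_line", ["land"], []),
   ("ramp", "oracle_text",
    ["add", "mana", "search", "basic land", "rampant growth", "cultivate",
     "sol ring", "signet", "talisman", "arcane signet", "chromatic lantern"],
    ["draw", "destroy", "counter"]),
   ("card_advantage", "oracle_text",
    ["draw", "card", "hand", "library", "exile.*play", "impulse", "scry 2 or more"],
    ["discard", "destroy"]),
   ("targeted_disruption", "oracle_text",
    ["destroy target", "exile target", "counter target", "return target",
     "bounce", "remove", "path to exile", "swords to plowshares"], []),
   ("mass_disruption", "oracle_text",
    ["destroy all", "exile all", "return all", "wrath", "board wipe",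
     "each player", "each opponent", "all creatures", "all artifacts"], [])]

def pvCategoryOrder : List String :=
  ["ramp", "card_advantage", "targeted_disruption", "mass_disruption", "lands", "plan_cards"]

def pvClassify (card_data : List (String × String)) : String :=
  let type_line := PySem.Str.lower ((PySem.Dict.mk card_data).getD "type_line" "")
  let oracle_text := PySem.Str.lower ((PySem.Dict.mk card_data).getD "oracle_text" "")
  match pvRules.find? (fun r =>
      let text := if r.2.1 == "type_line" then type_line else oracle_text
      (r.2.2.1.any (fun k => PySem.Str.isIn k text))
        && !(r.2.2.2.any (fun k => PySem.Str.isIn k text))) with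
  | some r => r.1
  | none => "plan_cards"

def categorize_cards_automatically_py_alt (found_cards : List (List (String × String))) : List (String × List String) :=
  pvCategoryOrder.map (fun cat =>
    (cat, (found_cards.filter (fun c => pvClassify c == cat)).map
            (fun c => (PySem.Dict.mk c).getD "name" "")))

-- ===== PRECONDITION & SPEC =====
def Spec_categorize_cards_automatically_py (found_cards : List (List (String × String))) (out : List (String × List String)) : Prop := out = categorize_cards_automatically_py_alt found_cards
instance (found_cards : List (List (String × String))) (out : List (String × List String)) : Decidable (Spec_categorize_cards_automatically_py found_cards out) := by unfold Spec_categorize_cards_automatically_py; infer_instance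

-- ===== CLAIM (what is proved, stated in full; the proofs are below) =====
def Claim_equal_categorize_cards_automatically_py : Prop := ∀ (found_cards : List (List (String × String))), Dom_categorize_cards_automatically_py found_cards → Spec_categorize_cards_automatically_py found_cards (categorize_cards_automatically_py found_cards)


-- ===== LEMMAS AND PROOFS =====

-- the six-bucket dict A maintains, abstracted over its current values
def pvMk6 (r ca td md l p : List String) : PySem.Dict String (List String) :=
  PySem.Dict.ofList [("ramp", r), ("card_advantage", ca), ("targeted_disruption", td),
                     ("mass_disruption", md), ("lands", l), ("plan_cards", p)]

-- the names B's comprehension collects for one category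
def pvSel (cat : String) (cards : List (List (String × String))) : List String :=
  (cards.filter (fun c => pvClassify c == cat)).map (fun c => (PySem.Dict.mk c).getD "name" "")

def pvNm (c : List (String × String)) : String := (PySem.Dict.mk c).getD "name" ""
def pvTL (c : List (String × String)) : String := PySem.Str.lower ((PySem.Dict.mk c).getD "type_line" "")
def pvOT (c : List (String × String)) : String := PySem.Str.lower ((PySem.Dict.mk c).getD "oracle_text" "")

-- A's five branch conditions, named
def pvC1 (c : List (String × String)) : Bool := PySem.Str.isIn "land" (pvTL c)
def pvC2 (c : List (String × String)) : Bool :=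
  (["add", "mana", "search", "basic land", "rampant growth", "cultivate",
    "sol ring", "signet", "talisman", "arcane signet", "chromatic lantern"].any
      (fun k => PySem.Str.isIn k (pvOT c)))
  && !(["draw", "destroy", "counter"].any (fun k => PySem.Str.isIn k (pvOT c)))
def pvC3 (c : List (String × String)) : Bool :=
  (["draw", "card", "hand", "library", "exile.*play", "impulse", "scry 2 or more"].any
      (fun k => PySem.Str.isIn k (pvOT c)))
  && !(["discard", "destroy"].any (fun k => PySem.Str.isIn k (pvOT c)))
def pvC4 (c : List (String × String)) : Bool :=
  ["destroy target", "exile target", "counter target", "return target",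
   "bounce", "remove", "path to exile", "swords to plowshares"].any
    (fun k => PySem.Str.isIn k (pvOT c))
def pvC5 (c : List (String × String)) : Bool :=
  ["destroy all", "exile all", "return all", "wrath", "board wipe",
   "each player", "each opponent", "all creatures", "all artifacts"].any
    (fun k => PySem.Str.isIn k (pvOT c))

theorem pvMk6_items (r ca td md l p : List String) : (pvMk6 r ca td md l p).items =
    [("ramp", r), ("card_advantage", ca), ("targeted_disruption", td),
     ("mass_disruption", md), ("lands", l), ("plan_cards", p)] := rfl

-- A's loop body, written as a case split on A's five conditions
theorem pvStep_eq (r ca td md l p : List String) (c : List (String × String)) :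
    pvStepA (pvMk6 r ca td md l p) c =
    (if pvC1 c then pvMk6 r ca td md (l ++ [pvNm c]) p
     else if pvC2 c then pvMk6 (r ++ [pvNm c]) ca td md l p
     else if pvC3 c then pvMk6 r (ca ++ [pvNm c]) td md l p
     else if pvC4 c then pvMk6 r ca (td ++ [pvNm c]) md l p
     else if pvC5 c then pvMk6 r ca td (md ++ [pvNm c]) l p
     else pvMk6 r ca td md l (p ++ [pvNm c])) := by
  unfold pvStepA pvC1 pvC2 pvC3 pvC4 pvC5 pvTL pvOT pvNm
  rfl

-- B's first-matching-rule classifier agrees with A's branch chain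
theorem pvClassify_eq (c : List (String × String)) :
    pvClassify c =
    (if pvC1 c then "lands"
     else if pvC2 c then "ramp"
     else if pvC3 c then "card_advantage"
     else if pvC4 c then "targeted_disruption"
     else if pvC5 c then "mass_disruption"
     else "plan_cards") := by
  unfold pvClassify pvRules pvC1 pvC2 pvC3 pvC4 pvC5 pvTL pvOT
  simp only [List.find?_cons, List.find?_nil, List.any_cons, List.any_nil,
    Bool.or_false, Bool.not_false, Bool.and_true, String.reduceBEq, beq_self_eq_true,
    Bool.false_eq_true, if_true, if_false]
  generalize PySem.Str.lower ((PySem.Dict.mk c).getD "type_line" "") = tl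
  generalize PySem.Str.lower ((PySem.Dict.mk c).getD "oracle_text" "") = ot
  split_ifs <;> (simp only [Bool.not_eq_true] at *; simp only [*])

theorem pvSel_cons (cat : String) (c : List (String × String))
    (cs : List (List (String × String))) :
    pvSel cat (c :: cs) = (if pvClassify c == cat then [pvNm c] else []) ++ pvSel cat cs := by
  simp only [pvSel, pvNm, List.filter_cons]
  split_ifs <;> simp

theorem pvFold_items (cards : List (List (String × String))) (r ca td md l p : List String) :
    (cards.foldl pvStepA (pvMk6 r ca td md l p)).items =
      [("ramp", r ++ pvSel "ramp" cards), ("card_advantage", ca ++ pvSel "card_advantage" cards),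
       ("targeted_disruption", td ++ pvSel "targeted_disruption" cards),
       ("mass_disruption", md ++ pvSel "mass_disruption" cards),
       ("lands", l ++ pvSel "lands" cards), ("plan_cards", p ++ pvSel "plan_cards" cards)] := by
  induction cards generalizing r ca td md l p with
  | nil => rw [List.foldl_nil, pvMk6_items]; simp [pvSel]
  | cons c cs ih =>
    rw [List.foldl_cons, pvStep_eq]
    have hcl := pvClassify_eq c
    split_ifs <;> simp_all [pvSel_cons, List.append_assoc]

-- ===== VERDICT (by name: the statement is the Claim_ definition above) =====
theorem categorize_cards_automatically_py_spec : Claim_equal_categorize_cards_automatically_py := by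
  intro found_cards _
  unfold Spec_categorize_cards_automatically_py
  show (found_cards.foldl pvStepA (pvMk6 [] [] [] [] [] [])).items = _
  rw [pvFold_items]
  simp [categorize_cards_automatically_py_alt, pvCategoryOrder, pvSel]
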